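-- pv_equiv track=rewrite | github.com/EinarTheSad/oslet | tools/bmf_editor.py | trim_vertical
-- ===== SOURCE A (Python) =====
-- def trim_vertical(glyph):
--     bitmap = glyph['bitmap']
--     if not bitmap:
--         return False
--
--     modified = False
--
--     while len(bitmap) > 1:
--         if all(pixel == 0 for pixel in bitmap[0]):
--             bitmap.pop(0)
--             modified = True
--         else:
--             break
--
--     while len(bitmap) > 1:
--         if all(pixel == 0 for pixel in bitmap[-1]):
--             bitmap.pop()
--             modified = True
--         else:
--             break
--
--     glyph['bitmap'] = bitmap
--     return modified
-- ===== SOURCE B (Python) =====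
-- # B: compute the trimmed bitmap functionally (drop blank prefix, then blank suffix via
-- # reverse) and report modification as a length change, instead of A's two in-place
-- # pop loops with a flag. A mutates the bitmap list in place; B rebinds glyph['bitmap']
-- # to a new list with the same contents (return value and final glyph['bitmap'] agree).
--
-- def _dropwhile_blank(rows):
--     if rows and all(p == 0 for p in rows[0]):
--         return _dropwhile_blank(rows[1:])
--     return rows
--
-- def trim_vertical(glyph):
--     bitmap = glyph['bitmap']
--     if not bitmap:
--         return False
--     core = _dropwhile_blank(bitmap)
--     if not core:
--         new = bitmap[-1:]
--     else:
--         new = list(reversed(_dropwhile_blank(list(reversed(core)))))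
--     glyph['bitmap'] = new
--     return len(new) != len(bitmap)
-- ===== Notes on version B (the rewrite author's own statement) =====
-- stated objective: alternative
-- what changed: Replaces A's two stateful while-loops that pop rows in place while tracking a 'modified' flag with a functional pipeline: drop the blank prefix, drop the blank suffix via reverse, and report modification as a change in length.
-- outside the precondition, e.g. on trim_vertical({}): A raises KeyError, B raises KeyError
import Mathlib
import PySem

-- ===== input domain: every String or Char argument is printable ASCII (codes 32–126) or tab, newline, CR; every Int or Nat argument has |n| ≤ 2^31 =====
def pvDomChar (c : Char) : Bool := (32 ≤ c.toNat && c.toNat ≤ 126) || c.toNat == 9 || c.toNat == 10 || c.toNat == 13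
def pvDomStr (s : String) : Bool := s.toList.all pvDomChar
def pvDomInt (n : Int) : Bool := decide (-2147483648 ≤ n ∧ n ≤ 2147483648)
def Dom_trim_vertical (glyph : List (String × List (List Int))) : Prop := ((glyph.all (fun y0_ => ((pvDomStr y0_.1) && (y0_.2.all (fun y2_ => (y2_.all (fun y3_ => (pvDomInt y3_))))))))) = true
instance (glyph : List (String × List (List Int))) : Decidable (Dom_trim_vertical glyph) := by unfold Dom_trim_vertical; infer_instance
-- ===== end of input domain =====

-- B trims with two functional dropWhile passes (front, then back via reverse) and reports
-- modification as a length change, instead of A's two in-place pop loops with a flag.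
-- A mutates glyph['bitmap'] in place, B rebinds it to a new equal list; the theorem below
-- is about the return value.

-- ===== PORT A =====
-- all(pixel == 0 for pixel in row)
def pvBlank (row : List Int) : Bool := row.all (fun p => p == 0)

-- first while loop: pop(0) while len > 1 and first row blank, tracking `modified`
def pvTrimFrontA : List (List Int) → Bool → List (List Int) × Bool
  | [], m => ([], m)
  | [r], m => ([r], m)
  | r :: rest, m => if pvBlank r then pvTrimFrontA rest true else (r :: rest, m)

-- second while loop: pop() while len > 1 and last row blank
def pvTrimBackA (b : List (List Int)) (m : Bool) : List (List Int) × Bool :=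
  if _h : 1 < b.length then
    if pvBlank (b.getLastD []) then pvTrimBackA b.dropLast true else (b, m)
  else (b, m)
  termination_by b.length
  decreasing_by simp [List.length_dropLast]; omega

def trim_vertical (glyph : List (String × List (List Int))) : Bool :=
  match glyph.lookup "bitmap" with    -- glyph['bitmap']; KeyError (excluded by Pre_) if absent
  | none => false
  | some bitmap =>
    if bitmap.isEmpty then false
    else
      let (b1, m1) := pvTrimFrontA bitmap false
      let (_, m2) := pvTrimBackA b1 m1
      m2

-- ===== PORT B =====
-- _dropwhile_blank, recursive as in Source B
def pvDropBlank : List (List Int) → List (List Int)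
  | [] => []
  | r :: rest => if pvBlank r then pvDropBlank rest else r :: rest

def trim_vertical_alt (glyph : List (String × List (List Int))) : Bool :=
  match glyph.lookup "bitmap" with    -- glyph['bitmap']; KeyError (excluded by Pre_) if absent
  | none => false
  | some bitmap =>
    if bitmap.isEmpty then false
    else
      let core := pvDropBlank bitmap
      let new :=
        if core.isEmpty then PySem.List.slice bitmap (some (-1)) none   -- bitmap[-1:]
        else (pvDropBlank core.reverse).reverse
      decide (new.length ≠ bitmap.length)

-- ===== PRECONDITION & SPEC =====
-- Pre_ excludes exactly the inputs where glyph['bitmap'] raises KeyError (both A and B raise there).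
def Pre_trim_vertical (glyph : List (String × List (List Int))) : Prop :=
  (glyph.lookup "bitmap").isSome = true
instance (glyph : List (String × List (List Int))) : Decidable (Pre_trim_vertical glyph) := by unfold Pre_trim_vertical; infer_instance
def pvWitness_trim_vertical : (List (String × List (List Int))) := [("bitmap", [[0, 0], [1, 0], [0, 0]])]

def Spec_trim_vertical (glyph : List (String × List (List Int))) (out : Bool) : Prop := out = trim_vertical_alt glyph
instance (glyph : List (String × List (List Int))) (out : Bool) : Decidable (Spec_trim_vertical glyph out) := by unfold Spec_trim_vertical; infer_instance

-- ===== CLAIM (what is proved, stated in full; the proofs are below) =====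
def Claim_equal_trim_vertical : Prop := ∀ (glyph : List (String × List (List Int))), Dom_trim_vertical glyph → Pre_trim_vertical glyph → Spec_trim_vertical glyph (trim_vertical glyph)

-- ===== LEMMAS AND PROOFS =====

theorem pvDropBlank_suffix (b : List (List Int)) : pvDropBlank b <:+ b := by
  induction b with
  | nil => simp [pvDropBlank]
  | cons r rest ih =>
    simp only [pvDropBlank]
    split
    · exact ih.trans (List.suffix_cons r rest)
    · exact List.suffix_rfl

theorem pvDropBlank_length_le (b : List (List Int)) : (pvDropBlank b).length ≤ b.length :=
  (pvDropBlank_suffix b).length_le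

theorem pvDropBlank_eq_iff_length (b : List (List Int)) :
    pvDropBlank b = b ↔ (pvDropBlank b).length = b.length := by
  constructor
  · intro h; rw [h]
  · intro h; exact (pvDropBlank_suffix b).eq_of_length h

theorem pvDropBlank_all (b : List (List Int)) (h : ∀ r ∈ b, pvBlank r = true) :
    pvDropBlank b = [] := by
  induction b with
  | nil => rfl
  | cons r rest ih =>
    simp only [pvDropBlank, h r (by simp), if_true]
    exact ih (fun x hx => h x (by simp [hx]))

theorem pvDropBlank_cons_not (r : List Int) (rest : List (List Int)) (h : pvBlank r = false) :
    pvDropBlank (r :: rest) = r :: rest := by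
  simp [pvDropBlank, h]

-- head of a nonempty pvDropBlank result is not blank
theorem pvDropBlank_head_not_blank (b : List (List Int)) (r : List Int) (rest : List (List Int))
    (h : pvDropBlank b = r :: rest) : pvBlank r = false := by
  induction b with
  | nil => simp [pvDropBlank] at h
  | cons x xs ih =>
    simp only [pvDropBlank] at h
    by_cases hx : pvBlank x = true
    · rw [if_pos hx] at h; exact ih h
    · rw [if_neg hx] at h
      cases h; simpa using hx

-- A's front loop when everything is blank: keeps the LAST row
theorem pvTrimFrontA_all (b : List (List Int)) (m : Bool)
    (hne : b ≠ []) (h : ∀ r ∈ b, pvBlank r = true) :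
    pvTrimFrontA b m = ([b.getLastD []], m || decide (1 < b.length)) := by
  induction b generalizing m with
  | nil => simp at hne
  | cons r rest ih =>
    cases rest with
    | nil => simp [pvTrimFrontA]
    | cons y ys =>
      simp only [pvTrimFrontA, h r (by simp), if_true]
      rw [ih true (by simp) (fun x hx => h x (by simp [hx]))]
      simp

-- A's front loop when some row is not blank: result is pvDropBlank, modified ↔ dropped
theorem pvTrimFrontA_not_all (b : List (List Int)) (m : Bool)
    (h : ¬ ∀ r ∈ b, pvBlank r = true) :
    pvTrimFrontA b m = (pvDropBlank b, m || decide (pvDropBlank b ≠ b)) := by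
  induction b generalizing m with
  | nil => exact absurd (by simp) h
  | cons r rest ih =>
    by_cases hr : pvBlank r = true
    · have hrest : ¬ ∀ x ∈ rest, pvBlank x = true := by
        intro hall
        apply h
        intro x hx
        rcases List.mem_cons.mp hx with h1 | h2
        · rw [h1]; exact hr
        · exact hall x h2
      have hrestne : rest ≠ [] := by
        rintro rfl; exact hrest (by simp)
      have hlen : (pvDropBlank rest).length ≤ rest.length := pvDropBlank_length_le rest
      have hne : pvDropBlank rest ≠ r :: rest := by
        intro he
        have := congrArg List.length he
        simp at this; omega
      cases rest with
      | nil => simp at hrestne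
      | cons y ys =>
        simp only [pvTrimFrontA, hr, if_true]
        rw [ih true hrest]
        simp only [pvDropBlank, hr, if_true]
        have hne' : ¬(if pvBlank y = true then pvDropBlank ys else y :: ys) = r :: y :: ys := by
          simpa [pvDropBlank] using hne
        simp [hne']
    · cases rest with
      | nil => simp [pvTrimFrontA, pvDropBlank, hr]
      | cons y ys => simp [pvTrimFrontA, pvDropBlank, hr]

-- A's back loop in terms of pvDropBlank on the reverse
theorem pvTrimBackA_not_all (b : List (List Int)) (m : Bool)
    (h : ¬ ∀ r ∈ b, pvBlank r = true) :
    pvTrimBackA b m =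
      ((pvDropBlank b.reverse).reverse,
        m || decide (pvDropBlank b.reverse ≠ b.reverse)) := by
  induction hn : b.length using Nat.strong_induction_on generalizing b m with
  | _ n ih =>
  have hne : b ≠ [] := by rintro rfl; exact h (by simp)
  by_cases hlen : 1 < b.length
  · have hgl : b.getLast?.getD [] = b.getLast hne := by
      rw [List.getLast?_eq_some_getLast hne]
      rfl
    have hdl : b = b.dropLast ++ [b.getLast?.getD []] := by
      conv_lhs => rw [← List.dropLast_append_getLast hne]
      rw [hgl]
    have hrev : b.reverse = b.getLast?.getD [] :: b.dropLast.reverse := by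
      conv_lhs => rw [hdl]; rw [List.reverse_append]
      simp
    by_cases hl : pvBlank (b.getLast?.getD []) = true
    · rw [pvTrimBackA, dif_pos hlen, List.getLastD_eq_getLast?, if_pos hl]
      have hdrest : ¬ ∀ r ∈ b.dropLast, pvBlank r = true := by
        intro hall
        apply h
        intro r hr
        conv at hr => rw [hdl]
        rcases List.mem_append.mp hr with h1 | h2
        · exact hall r h1
        · simp at h2; rw [h2]; exact hl
      have hdllen : b.dropLast.length < n := by
        rw [← hn]; simp [List.length_dropLast]; omega
      rw [ih b.dropLast.length hdllen b.dropLast true hdrest rfl]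
      rw [hrev]
      simp only [pvDropBlank, hl, if_true]
      have hsuf := pvDropBlank_length_le b.dropLast.reverse
      have hne2 : pvDropBlank b.dropLast.reverse ≠ b.getLast?.getD [] :: b.dropLast.reverse := by
        intro he
        have := congrArg List.length he
        simp only [List.length_cons] at this
        omega
      simp [hne2]
    · rw [pvTrimBackA, dif_pos hlen, List.getLastD_eq_getLast?, if_neg hl]
      rw [hrev, pvDropBlank_cons_not _ _ (by simpa using hl), ← hrev]
      simp
  · -- length = 1 (b nonempty), and b's single row is not blank
    cases b with
    | nil => simp at hne
    | cons r rest =>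
      cases rest with
      | cons y ys => simp at hlen
      | nil =>
        have hr : pvBlank r = false := by
          by_contra hc
          exact h (by intro x hx; simp at hx; rw [hx]; simpa using hc)
        rw [pvTrimBackA]
        rw [dif_neg (by simp)]
        simp [pvDropBlank, hr]

theorem pvDropBlank_ne_iff (l : List (List Int)) :
    pvDropBlank l ≠ l ↔ (pvDropBlank l).length < l.length := by
  constructor
  · intro hne2
    have hle := pvDropBlank_length_le l
    rcases Nat.lt_or_ge (pvDropBlank l).length l.length with h1 | h1
    · exact h1
    · exact absurd ((pvDropBlank_eq_iff_length l).mpr (by omega)) hne2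
  · intro hlt he
    have := congrArg List.length he
    omega

theorem trim_vertical_spec_aux (glyph : List (String × List (List Int)))
    (h : Pre_trim_vertical glyph) :
    trim_vertical glyph = trim_vertical_alt glyph := by
  unfold Pre_trim_vertical at h
  rcases Option.isSome_iff_exists.mp h with ⟨bitmap, hb⟩
  simp only [trim_vertical, trim_vertical_alt, hb]
  by_cases hemp : bitmap.isEmpty
  · simp [hemp]
  · rw [if_neg hemp, if_neg hemp]
    have hne : bitmap ≠ [] := by simpa [List.isEmpty_iff] using hemp
    by_cases hall : ∀ r ∈ bitmap, pvBlank r = true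
    · -- all rows blank: A keeps the last row, B returns |bitmap[-1:]| ≠ |bitmap|
      rw [pvTrimFrontA_all bitmap false hne hall]
      rw [pvTrimBackA]
      rw [dif_neg (by simp)]
      have hcore : pvDropBlank bitmap = [] := pvDropBlank_all bitmap hall
      simp only [hcore, List.isEmpty_nil, if_true]
      rw [PySem.List.slice_from_neg_one]
      have hlen : 0 < bitmap.length := List.length_pos_iff.mpr hne
      simp only [List.length_drop]
      rcases Nat.lt_or_ge 1 bitmap.length with h1 | h1
      · simp only [Bool.false_or]
        rw [decide_eq_decide.mpr (by omega : (1 < bitmap.length) ↔ (bitmap.length - (bitmap.length - 1) ≠ bitmap.length))]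
      · have : bitmap.length = 1 := by omega
        simp [this]
    · -- some row is not blank
      rw [pvTrimFrontA_not_all bitmap false hall]
      set d := pvDropBlank bitmap with hd
      have hdne : d ≠ [] := by
        intro hdnil
        cases hb2 : bitmap with
        | nil => exact hne hb2
        | cons r rest =>
          -- pvDropBlank = [] forces every row blank
          apply hall
          intro x hx
          by_contra hxb
          -- find the first non-blank row: induction argument
          have : ∀ (l : List (List Int)), pvDropBlank l = [] → ∀ y ∈ l, pvBlank y = true := by
            intro l
            induction l with
            | nil => intro _ y hy; simp at hy
            | cons a as iha =>
              intro hl y hy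
              simp only [pvDropBlank] at hl
              by_cases ha : pvBlank a = true
              · rw [if_pos ha] at hl
                rcases List.mem_cons.mp hy with h1 | h2
                · rw [h1]; exact ha
                · exact iha hl y h2
              · rw [if_neg ha] at hl; simp at hl
          exact hxb (this bitmap (hd ▸ hdnil) x hx)
      have hdnotall : ¬ ∀ r ∈ d, pvBlank r = true := by
        cases hdc : d with
        | nil => exact absurd hdc hdne
        | cons r rest =>
          intro hall2
          have := pvDropBlank_head_not_blank bitmap r rest (hd ▸ hdc)
          have := hall2 r (by simp)
          simp_all only [Bool.true_eq_false]
      rw [pvTrimBackA_not_all d _ hdnotall]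
      simp only [List.isEmpty_iff, hdne]
      have heq1 : (d ≠ bitmap) ↔ d.length < bitmap.length := by
        rw [hd, pvDropBlank_ne_iff, ← hd]
      have heq2 : (pvDropBlank d.reverse ≠ d.reverse) ↔ (pvDropBlank d.reverse).length < d.length := by
        rw [pvDropBlank_ne_iff, List.length_reverse]
      have hsuf1 : d.length ≤ bitmap.length := by
        rw [hd]; exact pvDropBlank_length_le bitmap
      have hsuf2 : (pvDropBlank d.reverse).length ≤ d.length := by
        have := pvDropBlank_length_le d.reverse
        simpa using this
      have heq3 : ((pvDropBlank d.reverse).reverse.length ≠ bitmap.length) ↔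
          (d ≠ bitmap) ∨ (pvDropBlank d.reverse ≠ d.reverse) := by
        rw [heq1, heq2, List.length_reverse]
        omega
      simp only [if_false]
      rw [Bool.false_or, decide_eq_decide.mpr heq3]
      · by_cases hP : d ≠ bitmap <;> by_cases hQ : pvDropBlank d.reverse ≠ d.reverse <;>
          simp [hP, hQ]
      · infer_instance

-- ===== VERDICT (by name: the statement is the Claim_ definition above) =====
theorem trim_vertical_spec : Claim_equal_trim_vertical := by
  intro glyph _ hpre
  exact trim_vertical_spec_aux glyph hpre
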